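-- pv_equiv track=rewrite | github.com/nezxar/runpod-srt-burner | handler.py | intelligently_wrap_text
-- ===== SOURCE A (Python) =====
-- def intelligently_wrap_text(text, max_length=45, spacer_size=12, original_font_size=42):
--     if len(text) <= max_length:
--         return text
--     words = text.split(' ')
--     if not words or len(words) == 1:
--         return text
--     mid_point = len(text) // 2
--     best_split_index = -1
--     min_distance_from_mid = float('inf')
--     current_pos = 0
--     for i, word in enumerate(words):
--         if i < len(words) - 1:
--             split_candidate_pos = current_pos + len(word)
--             distance = abs(split_candidate_pos - mid_point)
--             if distance < min_distance_from_mid: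
--                 min_distance_from_mid = distance
--                 best_split_index = i + 1
--         current_pos += len(word) + 1
--     if best_split_index != -1:
--         line1 = ' '.join(words[:best_split_index])
--         line2 = ' '.join(words[best_split_index:])
--         return f"{line1}\\N{{\\fs{spacer_size}}}\\N{{\\fs{original_font_size}}}{line2}"
--     return text
-- ===== SOURCE B (Python) =====
-- def intelligently_wrap_text(text, max_length=45, spacer_size=12, original_font_size=42):
--     if len(text) <= max_length:
--         return text
--     words = text.split(' ')
--     if len(words) == 1:
--         return text
--     mid = len(text) // 2
--     # Candidate split positions grow strictly with the word index, so the cut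
--     # nearest the midpoint sits at the first crossing of mid: stop scanning
--     # there and compare only that cut with its predecessor (predecessor wins
--     # ties, i.e. first-minimum order). No full minimisation pass is needed.
--     j = 0
--     cut = len(words[0])
--     prev = None
--     for w in words[1:-1]:
--         if cut >= mid:
--             break
--         j += 1
--         prev, cut = cut, cut + 1 + len(w)
--     if prev is not None and mid - prev <= cut - mid:
--         k = j
--     else:
--         k = j + 1
--     line1 = ' '.join(words[:k])
--     line2 = ' '.join(words[k:])
--     return f"{line1}\\N{{\\fs{spacer_size}}}\\N{{\\fs{original_font_size}}}{line2}"
-- ===== Notes on version B (the rewrite author's own statement) =====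
-- stated objective: alternative
-- what changed: Instead of A's full minimisation pass that tracks the best index/distance over every candidate split, B exploits that the candidate split positions are strictly increasing: it scans only until the first cut at or past the text midpoint (early exit) and compares just that cut with its predecessor, the predecessor winning ties exactly like A's first-strict-minimum rule.
import Mathlib
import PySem

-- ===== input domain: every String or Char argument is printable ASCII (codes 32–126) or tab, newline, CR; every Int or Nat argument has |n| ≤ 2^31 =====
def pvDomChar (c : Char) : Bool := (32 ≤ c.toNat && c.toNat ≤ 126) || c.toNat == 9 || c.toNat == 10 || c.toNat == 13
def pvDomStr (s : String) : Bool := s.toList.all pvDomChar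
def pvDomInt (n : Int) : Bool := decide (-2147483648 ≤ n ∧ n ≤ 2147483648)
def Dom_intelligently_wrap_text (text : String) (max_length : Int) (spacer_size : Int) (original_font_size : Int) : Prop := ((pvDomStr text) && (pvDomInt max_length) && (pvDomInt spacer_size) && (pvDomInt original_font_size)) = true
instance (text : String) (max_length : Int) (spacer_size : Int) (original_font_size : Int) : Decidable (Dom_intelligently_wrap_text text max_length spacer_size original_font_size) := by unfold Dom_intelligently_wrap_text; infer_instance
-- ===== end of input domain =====

-- B drops A's full minimisation pass: the candidate split positions are strictly increasing, so B
-- scans only to the first cut >= midpoint (early exit) and compares just that cut with its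
-- predecessor (predecessor wins ties = A's first-strict-minimum). Objective: alternative algorithm.

-- ===== PORT A =====
-- min_distance_from_mid starts unboundedly large in A; every later value is a finite int, so the
-- Option encoding (none = no candidate yet, smaller than nothing) is exact: `pyLtInf d m?` is Python's `d < m?`.
def pyLtInf (d : Int) (m? : Option Int) : Bool :=
  match m? with | none => true | some m => d < m

def intelligently_wrap_text (text : String) (max_length : Int) (spacer_size : Int) (original_font_size : Int) : String :=
  if PySem.Str.len text ≤ max_length then text
  else
    -- sep " " is nonempty, so split? is always `some`; getD's default is never used
    let words := (PySem.Str.split? text " ").getD []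
    if words = [] ∨ words.length = 1 then text
    else
      let mid_point : Int := PySem.Int.floordiv (PySem.Str.len text) 2
      let n : Int := (words.length : Int)
      -- state = (best_split_index, min_distance_from_mid, current_pos)
      let st := (PySem.List.enumerate words).foldl
        (fun (st : Int × Option Int × Int) (iw : Int × String) =>
          if iw.1 < n - 1 then
            let split_candidate_pos : Int := st.2.2 + PySem.Str.len iw.2
            let distance : Int := |split_candidate_pos - mid_point|
            if pyLtInf distance st.2.1 then
              (iw.1 + 1, some distance, st.2.2 + PySem.Str.len iw.2 + 1)
            else (st.1, st.2.1, st.2.2 + PySem.Str.len iw.2 + 1)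
          else (st.1, st.2.1, st.2.2 + PySem.Str.len iw.2 + 1))
        (-1, none, 0)
      if st.1 ≠ -1 then
        let line1 := PySem.Str.join " " (PySem.List.slice words none (some st.1))
        let line2 := PySem.Str.join " " (PySem.List.slice words (some st.1) none)
        line1 ++ "\\N{\\fs" ++ PySem.Int.toStr spacer_size ++ "}\\N{\\fs" ++ PySem.Int.toStr original_font_size ++ "}" ++ line2
      else text

-- ===== PORT B =====
-- B's for-loop with break over words[1:-1]; state = (j, cut, prev)
def pvWalk (mid : Int) : List String → Int × Int × Option Int → Int × Int × Option Int
  | [], st => st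
  | w :: t, st =>
      if mid ≤ st.2.1 then st
      else pvWalk mid t (st.1 + 1, st.2.1 + 1 + PySem.Str.len w, some st.2.1)

def intelligently_wrap_text_alt (text : String) (max_length : Int) (spacer_size : Int) (original_font_size : Int) : String :=
  if PySem.Str.len text ≤ max_length then text
  else
    let words := (PySem.Str.split? text " ").getD []
    if words.length = 1 then text
    else
      let mid : Int := PySem.Int.floordiv (PySem.Str.len text) 2
      -- words is never empty (split(' ') of any string is nonempty), so words[0] is in range
      let w0 := (PySem.List.pyGet? words 0).getD ""
      let st := pvWalk mid (PySem.List.slice words (some 1) (some (-1))) (0, PySem.Str.len w0, none)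
      let k : Int :=
        match st.2.2 with
        | some p => if mid - p ≤ st.2.1 - mid then st.1 else st.1 + 1
        | none => st.1 + 1
      let line1 := PySem.Str.join " " (PySem.List.slice words none (some k))
      let line2 := PySem.Str.join " " (PySem.List.slice words (some k) none)
      line1 ++ "\\N{\\fs" ++ PySem.Int.toStr spacer_size ++ "}\\N{\\fs" ++ PySem.Int.toStr original_font_size ++ "}" ++ line2

-- ===== PRECONDITION & SPEC =====
def Spec_intelligently_wrap_text (text : String) (max_length : Int) (spacer_size : Int) (original_font_size : Int) (out : String) : Prop := out = intelligently_wrap_text_alt text max_length spacer_size original_font_size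
instance (text : String) (max_length : Int) (spacer_size : Int) (original_font_size : Int) (out : String) : Decidable (Spec_intelligently_wrap_text text max_length spacer_size original_font_size out) := by unfold Spec_intelligently_wrap_text; infer_instance

-- ===== CLAIM (what is proved, stated in full; the proofs are below) =====
def Claim_equal_intelligently_wrap_text : Prop := ∀ (text : String) (max_length : Int) (spacer_size : Int) (original_font_size : Int), Dom_intelligently_wrap_text text max_length spacer_size original_font_size → Spec_intelligently_wrap_text text max_length spacer_size original_font_size (intelligently_wrap_text text max_length spacer_size original_font_size)

-- ===== LEMMAS AND PROOFS =====

theorem strLen_nonneg (s : String) : 0 ≤ PySem.Str.len s := by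
  simp [PySem.Str.len]

-- split never returns the empty list
theorem splitOn_go_ne_nil (sep : List Char) (fuel : Nat) (l cur : List Char) (acc : List (List Char)) :
    PySem.Chars.splitOn.go sep fuel l cur acc ≠ [] := by
  induction fuel generalizing l cur acc with
  | zero => simp [PySem.Chars.splitOn.go]
  | succ fuel ih =>
    cases l with
    | nil => simp [PySem.Chars.splitOn.go]
    | cons c rest =>
      rw [PySem.Chars.splitOn.go]
      split
      · exact ih _ _ _
      · exact ih _ _ _

theorem words_ne_nil (text : String) : (PySem.Str.split? text " ").getD [] ≠ [] := by
  have hsep : (" " : String).toList = [' '] := rfl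
  simp only [PySem.Str.split?, PySem.Chars.split?, PySem.Chars.splitOn, hsep]
  simpa using splitOn_go_ne_nil _ _ _ _ _

-- list of split positions: cutsF pos ws = positions of the spaces after each word of ws,
-- when the first word starts at character index pos
def cutsF (pos : Int) : List String → List Int
  | [] => []
  | w :: t => (pos + PySem.Str.len w) :: cutsF (pos + PySem.Str.len w + 1) t

theorem cutsF_mem_ge (ws : List String) (pos y : Int) (h : y ∈ cutsF pos ws) : pos ≤ y := by
  induction ws generalizing pos with
  | nil => simp [cutsF] at h
  | cons w t ih =>
    have hw := strLen_nonneg w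
    simp only [cutsF, List.mem_cons] at h
    rcases h with h | h
    · omega
    · have := ih (pos + PySem.Str.len w + 1) h
      omega

-- A's selection loop, abstracted over the cuts list
def selA (mid : Int) : Int → Int × Option Int → List Int → Int × Option Int
  | _, st, [] => st
  | i, st, c :: t =>
      selA mid (i + 1)
        (if pyLtInf |c - mid| st.2 then (i + 1, some |c - mid|) else st) t

-- the first strict minimizer, as a fold (A's loop projected to (best index, best cut))
def selB (mid : Int) : Int → Int × Int → List Int → Int × Int
  | _, st, [] => st
  | i, st, c :: t =>
      selB mid (i + 1) (if |c - mid| < |st.2 - mid| then (i, c) else st) t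

-- A's loop, projected to (best_split_index, min_distance_from_mid), is selA over the cuts list
theorem afold_eq_selA (mid n : Int) (ws : List String) (i0 b : Int) (m : Option Int) (pos : Int)
    (hn : i0 + ws.length = n) :
    (((PySem.List.enumerate ws i0).foldl
        (fun (st : Int × Option Int × Int) (iw : Int × String) =>
          if iw.1 < n - 1 then
            let split_candidate_pos : Int := st.2.2 + PySem.Str.len iw.2
            let distance : Int := |split_candidate_pos - mid|
            if pyLtInf distance st.2.1 then
              (iw.1 + 1, some distance, st.2.2 + PySem.Str.len iw.2 + 1)
            else (st.1, st.2.1, st.2.2 + PySem.Str.len iw.2 + 1)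
          else (st.1, st.2.1, st.2.2 + PySem.Str.len iw.2 + 1))
        (b, m, pos)).1,
     ((PySem.List.enumerate ws i0).foldl
        (fun (st : Int × Option Int × Int) (iw : Int × String) =>
          if iw.1 < n - 1 then
            let split_candidate_pos : Int := st.2.2 + PySem.Str.len iw.2
            let distance : Int := |split_candidate_pos - mid|
            if pyLtInf distance st.2.1 then
              (iw.1 + 1, some distance, st.2.2 + PySem.Str.len iw.2 + 1)
            else (st.1, st.2.1, st.2.2 + PySem.Str.len iw.2 + 1)
          else (st.1, st.2.1, st.2.2 + PySem.Str.len iw.2 + 1))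
        (b, m, pos)).2.1)
      = selA mid i0 (b, m) (cutsF pos ws.dropLast) := by
  induction ws generalizing i0 b m pos with
  | nil => simp [selA, cutsF]
  | cons w t ih =>
    rw [PySem.List.enumerate_cons, List.foldl_cons]
    cases t with
    | nil =>
      have hlt : ¬ (i0 < n - 1) := by
        simp at hn; omega
      simp [hlt, selA, cutsF]
    | cons w1 t1 =>
      have hlt : i0 < n - 1 := by
        simp at hn
        omega
      have hn' : (i0 + 1) + ((w1 :: t1).length : Int) = n := by
        simp at hn ⊢; omega
      simp only [hlt, if_pos]
      have hdl : (w :: w1 :: t1).dropLast = w :: (w1 :: t1).dropLast := rfl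
      rw [hdl]
      simp only [cutsF, selA]
      by_cases hp : pyLtInf |pos + PySem.Str.len w - mid| m = true
      · rw [if_pos hp, if_pos hp]
        exact ih (i0 + 1) (i0 + 1) (some |pos + PySem.Str.len w - mid|) (pos + PySem.Str.len w + 1) hn'
      · rw [if_neg hp, if_neg hp]
        exact ih (i0 + 1) b m (pos + PySem.Str.len w + 1) hn'

-- selA started just after taking a candidate equals selB plus one
theorem selA_eq_selB (mid : Int) (cs : List Int) (i0 j c : Int) :
    selA mid i0 (j + 1, some |c - mid|) cs
      = ((selB mid i0 (j, c) cs).1 + 1, some |(selB mid i0 (j, c) cs).2 - mid|) := by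
  induction cs generalizing i0 j c with
  | nil => simp [selA, selB]
  | cons c' t ih =>
    simp only [selA, selB, pyLtInf]
    by_cases h : |c' - mid| < |c - mid|
    · simp only [h, if_pos, decide_true]
      exact ih (i0 + 1) i0 c'
    · simp only [h, if_neg, not_false_iff]
      exact ih (i0 + 1) j c

-- the selected index is never negative
theorem selB_fst_nonneg (mid : Int) (cs : List Int) (i0 : Int) (st : Int × Int)
    (h1 : 0 ≤ st.1) (h2 : 0 ≤ i0) : 0 ≤ (selB mid i0 st cs).1 := by
  induction cs generalizing i0 st with
  | nil => simpa [selB] using h1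
  | cons c t ih =>
    simp only [selB]
    by_cases h : |c - mid| < |st.2 - mid|
    · simp only [h, if_pos]
      exact ih (i0 + 1) (i0, c) h2 (by omega)
    · simp only [h, if_neg, not_false_iff]
      exact ih (i0 + 1) st h1 (by omega)

-- once nothing later can strictly beat the current best, selB is constant
theorem selB_const (mid : Int) (cs : List Int) (i0 : Int) (st : Int × Int)
    (h : ∀ y ∈ cs, ¬ (|y - mid| < |st.2 - mid|)) : selB mid i0 st cs = st := by
  induction cs generalizing i0 with
  | nil => rfl
  | cons c t ih =>
    have hc : ¬ (|c - mid| < |st.2 - mid|) := h c (by simp)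
    simp only [selB, hc, if_neg, not_false_iff]
    exact ih (i0 + 1) (fun y hy => h y (by simp [hy]))

-- the final split index computed by B from the walk's end state (proof-side abbreviation)
def kOf (mid : Int) (st : Int × Int × Option Int) : Int :=
  match st.2.2 with
  | some p => if mid - p ≤ st.2.1 - mid then st.1 else st.1 + 1
  | none => st.1 + 1

-- CORE: mid-walk, B's boundary scan computes A's first strict minimizer plus one.
-- State: prev cut p (index jw-1, still below mid) is selB's current best; cut (index jw) is next.
theorem walk_core (mid : Int) (ws : List String) (jw cut p : Int)
    (hp : p < mid) (hpc : p < cut) :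
    kOf mid (pvWalk mid ws (jw, cut, some p))
      = (selB mid jw (jw - 1, p) (cut :: cutsF (cut + 1) ws)).1 + 1 := by
  induction ws generalizing jw cut p with
  | nil =>
    simp only [pvWalk, cutsF, selB, kOf]
    by_cases h : mid - p ≤ cut - mid
    · have hno : ¬ (|cut - mid| < |p - mid|) := by
        rw [abs_of_neg (by omega : p - mid < 0)]
        have := le_abs_self (cut - mid)
        omega
      simp only [h, if_pos, hno, if_neg, not_false_iff]
      omega
    · have hyes : |cut - mid| < |p - mid| := by
        rw [abs_of_neg (by omega : p - mid < 0)]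
        by_cases hc : mid ≤ cut
        · rw [abs_of_nonneg (by omega : (0:Int) ≤ cut - mid)]; omega
        · rw [abs_of_neg (by omega : cut - mid < 0)]; omega
      simp [h, hyes]
  | cons w t ih =>
    have hw := strLen_nonneg w
    by_cases hcm : mid ≤ cut
    · -- crossed the midpoint: walk stops; every later cut is even farther from mid
      have habs_p : |p - mid| = mid - p := by rw [abs_of_neg (show p - mid < 0 by omega)]; ring
      have habs_c : |cut - mid| = cut - mid := abs_of_nonneg (show (0:Int) ≤ cut - mid by omega)
      have htail : ∀ y ∈ cutsF (cut + 1) (w :: t), cut < y := by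
        intro y hy
        have := cutsF_mem_ge (w :: t) (cut + 1) y hy
        omega
      simp only [pvWalk, hcm, if_pos, kOf, selB]
      by_cases h : mid - p ≤ cut - mid
      · have hno : ¬ (|cut - mid| < |p - mid|) := by rw [habs_p, habs_c]; omega
        have hconst : ∀ y ∈ cutsF (cut + 1) (w :: t), ¬ (|y - mid| < |((jw - 1, p) : Int × Int).2 - mid|) := by
          intro y hy
          have hygt := htail y hy
          simp only
          rw [habs_p, abs_of_nonneg (by omega : (0:Int) ≤ y - mid)]
          omega
        simp only [hno, if_neg, not_false_iff]
        rw [selB_const mid _ _ _ hconst]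
        simp only [h, if_pos]
        omega
      · have hyes : |cut - mid| < |p - mid| := by rw [habs_p, habs_c]; omega
        have hconst : ∀ y ∈ cutsF (cut + 1) (w :: t), ¬ (|y - mid| < |((jw, cut) : Int × Int).2 - mid|) := by
          intro y hy
          have hygt := htail y hy
          simp only
          rw [habs_c, abs_of_nonneg (by omega : (0:Int) ≤ y - mid)]
          omega
        simp only [hyes, if_pos, h, if_neg, not_false_iff]
        rw [selB_const mid _ _ _ hconst]
    · -- still below the midpoint: step; cut becomes the new (strictly closer) best
      have hyes : |cut - mid| < |p - mid| := by
        rw [abs_of_neg (by omega : p - mid < 0), abs_of_neg (by omega : cut - mid < 0)]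
        omega
      simp only [pvWalk, hcm, if_neg, not_false_iff, cutsF, selB, hyes, if_pos]
      have h2 := ih (jw + 1) (cut + 1 + PySem.Str.len w) cut (by omega) (by omega)
      rw [show jw + 1 - 1 = jw from by ring] at h2
      exact h2

-- top-level bridge: B's whole selection equals A's, starting from the first cut (index 0)
theorem walk_top (mid c : Int) (ws : List String) :
    kOf mid (pvWalk mid ws (0, c, none))
      = (selB mid 1 (0, c) (cutsF (c + 1) ws)).1 + 1 := by
  cases ws with
  | nil => simp [pvWalk, cutsF, selB, kOf]
  | cons w t =>
    have hw := strLen_nonneg w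
    by_cases hcm : mid ≤ c
    · have habs_c : |c - mid| = c - mid := abs_of_nonneg (by omega)
      have hconst : ∀ y ∈ cutsF (c + 1) (w :: t), ¬ (|y - mid| < |((0, c) : Int × Int).2 - mid|) := by
        intro y hy
        have hyge := cutsF_mem_ge (w :: t) (c + 1) y hy
        simp only
        rw [habs_c, abs_of_nonneg (by omega : (0:Int) ≤ y - mid)]
        omega
      simp only [pvWalk, hcm, if_pos, kOf]
      rw [selB_const mid _ _ _ hconst]
    · simp only [pvWalk, hcm, if_neg, not_false_iff, cutsF]
      have h2 := walk_core mid t (0 + 1) (c + 1 + PySem.Str.len w) c (by omega) (by omega)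
      rw [show (0:Int) + 1 - 1 = 0 from by ring, show (0:Int) + 1 = 1 from by ring] at h2
      exact h2

-- ===== VERDICT (by name: the statement is the Claim_ definition above) =====
theorem intelligently_wrap_text_spec : Claim_equal_intelligently_wrap_text := by
  intro text max_length spacer_size original_font_size _
  unfold Spec_intelligently_wrap_text
  simp only [intelligently_wrap_text, intelligently_wrap_text_alt]
  by_cases h1 : PySem.Str.len text ≤ max_length
  · rw [if_pos h1, if_pos h1]
  · rw [if_neg h1, if_neg h1]
    have hw : (PySem.Str.split? text " ").getD [] ≠ [] := words_ne_nil text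
    set ws := (PySem.Str.split? text " ").getD [] with hws
    by_cases h2 : ws.length = 1
    · rw [if_pos (Or.inr h2), if_pos h2]
    · have hguard : ¬ (ws = [] ∨ ws.length = 1) := by
        rintro (h | h) <;> [exact hw h; exact h2 h]
      rw [if_neg hguard, if_neg h2]
      set mid := PySem.Int.floordiv (PySem.Str.len text) 2 with hmid
      have h0 : ws.length ≠ 0 := fun h => hw (List.length_eq_zero_iff.mp h)
      have hlen2 : 2 ≤ ws.length := by omega
      obtain ⟨wd, td, hdt⟩ : ∃ a t, ws = a :: t := by
        cases hx : ws with
        | nil => exact absurd hx hw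
        | cons a t => exact ⟨a, t, rfl⟩
      have htd : td ≠ [] := by
        intro h
        rw [hdt, h] at hlen2
        simp at hlen2
      -- A's fold reduced to selA over the cuts list
      have hA := afold_eq_selA mid (ws.length : Int) ws 0 (-1) none 0 (by simp)
      have hA1 := congrArg Prod.fst hA
      rw [hdt] at hA1
      have hdl : (wd :: td).dropLast = wd :: td.dropLast := by
        rw [List.dropLast_cons_of_ne_nil htd]
      rw [hdl] at hA1
      set c := (0 : Int) + PySem.Str.len wd with hc
      set t := cutsF ((0 : Int) + PySem.Str.len wd + 1) td.dropLast with ht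
      have hcf : cutsF 0 (wd :: td.dropLast) = c :: t := by rw [cutsF]
      rw [hcf] at hA1
      -- selA one step, then the bridge to selB (A's value = first strict minimizer + 1)
      have hstep : selA mid 0 (-1, none) (c :: t) = selA mid 1 (0 + 1, some |c - mid|) t := by
        simp [selA, pyLtInf]
      have hsel := selA_eq_selB mid t 1 0 c
      rw [hstep, hsel] at hA1
      -- B's pieces: words[0] and words[1:-1]
      rw [hdt]
      have hg0 : (PySem.List.pyGet? (wd :: td) (0 : Int)).getD "" = wd := by
        simp [PySem.List.pyGet?, PySem.List.pyIdx?]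
      have hslice : PySem.List.slice (wd :: td) (some 1) (some (-1)) = td.dropLast := by
        have hnl : ¬ ((td.length : Int) < 0) := by omega
        simp [PySem.List.slice, PySem.List.clampIdx, List.dropLast_eq_take, hnl]
      rw [hg0, hslice]
      -- B's selection equals A's
      have hB := walk_top mid (PySem.Str.len wd) td.dropLast
      have hcc : PySem.Str.len wd = c := by rw [hc]; ring
      rw [hcc] at hB
      have htt : cutsF (c + 1) td.dropLast = t := by rw [ht, hc]
      rw [htt] at hB
      -- A's -1 test succeeds (the chosen index is ≥ 1)
      have hnn : 0 ≤ (selB mid 1 (0, c) t).1 :=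
        selB_fst_nonneg mid t 1 (0, c) (by norm_num) (by norm_num)
      rw [hA1]
      rw [if_pos (by omega : ((selB mid 1 (0, c) t).1 + 1, some |(selB mid 1 (0, c) t).2 - mid|).1 ≠ -1)]
      rw [show PySem.Str.len wd = c from by rw [hc]; ring]
      -- both sides now split at the same index
      have hkOf : (match (pvWalk mid td.dropLast (0, c, none)).2.2 with
          | some p => if mid - p ≤ (pvWalk mid td.dropLast (0, c, none)).2.1 - mid
              then (pvWalk mid td.dropLast (0, c, none)).1
              else (pvWalk mid td.dropLast (0, c, none)).1 + 1
          | none => (pvWalk mid td.dropLast (0, c, none)).1 + 1)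
          = kOf mid (pvWalk mid td.dropLast (0, c, none)) := rfl
      rw [hkOf, hB]
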